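-- pv_equiv track=rewrite | github.com/AlinaOs/Doernenkrantz_TRD | trd/evaluation.py | evaluateRecall
-- ===== SOURCE A (Python) =====
-- def identicalMatches(match1: list[tuple[str, int, int]], match2: list[tuple[str, int, int]]) -> bool:
--     """
--     Match needs to be a list containing triples, each triple indicating an identifier for the text, the start index and
--     end index of the match. The matches are seen as identical, if at least two pairs of triplets can be found, such that
--     the pair's triplets belong to a different match respectively and each pair belongs to a different text, but the
--     triplets in each pair still belong to the same text and their indices overlap.
--
--     :param match1: A list of matching passages in triple.
--     :param match2: A list of matching passages in triple.
--     :return: True, if both matches denote the same passage. False otherwise.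
--     """
--
--     matchingpairs = dict()
--     for m1 in match1:
--         docid = m1[0]
--         for m2 in match2:
--             if m2[0] == docid and (
--                     (m1[1] <= m2[1] <= m1[2])
--                     or
--                     (m1[1] <= m2[2] <= m1[2])
--                     or
--                     (m2[1] <= m1[1] <= m2[2])
--                     or
--                     (m2[1] <= m1[2] <= m2[2])):
--                 mplist = matchingpairs.get(docid, [])
--                 mplist.append((m1, m2))
--                 matchingpairs[docid] = mplist
--
--     if len(matchingpairs.keys()) > 1:
--         return True
--
--     return False
--
-- def evaluateRecall(testmatches, goldmatches: list[list[tuple[str, int, int]]]):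
--     foundgms = []
--     # Evaluate the recall of goldmatches
--     for gmi in range(len(goldmatches)):
--         gm = goldmatches[gmi]
--         for tmi in range(len(testmatches)):
--             tm = testmatches[tmi]
--             if identicalMatches(gm, tm):
--                 foundgms.append((gmi, tm))
--                 break
--     return foundgms
-- ===== SOURCE B (Python) =====
-- def _overlapsTwoDocs(groups, tm):
--     """True iff triples of tm overlap gm-intervals (in groups) in two distinct docids."""
--     first = None
--     for d, s, e in tm:
--         ivs = groups.get(d, ())
--         if any(gs <= s <= ge or gs <= e <= ge or s <= gs <= e or s <= ge <= e
--                for gs, ge in ivs):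
--             if first is None:
--                 first = d
--             elif d != first:
--                 return True
--     return False
--
--
-- def evaluateRecall(testmatches, goldmatches: list[list[tuple[str, int, int]]]):
--     foundgms = []
--     for gmi, gm in enumerate(goldmatches):
--         # index the gold passage's intervals by docid, once per gold match
--         groups = {}
--         for d, s, e in gm:
--             groups.setdefault(d, []).append((s, e))
--         tm = next((t for t in testmatches if _overlapsTwoDocs(groups, t)), None)
--         if tm is not None:
--             foundgms.append((gmi, tm))
--     return foundgms
-- ===== Notes on version B (the rewrite author's own statement) =====
-- stated objective: faster
-- what changed: identicalMatches' full nested cross-scan of every gold triple against every test triple (building a dict of all matching pairs) is replaced by a docid index of the gold passage's intervals built once per gold match, against which each test passage is scanned in one pass with an early exit as soon as two distinct docids overlap.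
import Mathlib
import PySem

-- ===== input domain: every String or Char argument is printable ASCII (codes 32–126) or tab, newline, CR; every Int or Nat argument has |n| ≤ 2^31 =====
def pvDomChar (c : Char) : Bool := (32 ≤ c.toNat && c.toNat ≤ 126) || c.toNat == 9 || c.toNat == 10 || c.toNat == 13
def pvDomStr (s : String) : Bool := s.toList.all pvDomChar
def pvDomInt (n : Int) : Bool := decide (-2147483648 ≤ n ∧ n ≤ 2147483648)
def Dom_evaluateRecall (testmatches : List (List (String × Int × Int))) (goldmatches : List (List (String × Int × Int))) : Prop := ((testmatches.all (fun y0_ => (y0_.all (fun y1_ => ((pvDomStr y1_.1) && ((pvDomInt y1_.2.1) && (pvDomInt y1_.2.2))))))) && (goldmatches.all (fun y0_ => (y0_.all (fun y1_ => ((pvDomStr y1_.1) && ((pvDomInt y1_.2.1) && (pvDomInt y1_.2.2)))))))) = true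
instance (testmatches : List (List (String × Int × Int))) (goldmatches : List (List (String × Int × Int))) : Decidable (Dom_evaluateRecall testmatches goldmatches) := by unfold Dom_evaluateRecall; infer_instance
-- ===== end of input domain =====

-- B replaces identicalMatches' full nested cross-scan by a per-gold-match docid index of
-- intervals, scanned once per test passage with an early exit at the second overlapping docid.

-- ===== PORT A =====
-- identicalMatches: nested loop over match1 × match2, collecting overlapping pairs by docid
def identicalMatchesA (match1 match2 : List (String × Int × Int)) : Bool :=
  decide (1 <
    (match1.foldl (fun d m1 =>
      match2.foldl (fun d m2 =>
        if m2.1 == m1.1 &&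
            ((m1.2.1 ≤ m2.2.1 && m2.2.1 ≤ m1.2.2) ||
             (m1.2.1 ≤ m2.2.2 && m2.2.2 ≤ m1.2.2) ||
             (m2.2.1 ≤ m1.2.1 && m1.2.1 ≤ m2.2.2) ||
             (m2.2.1 ≤ m1.2.2 && m1.2.2 ≤ m2.2.2)) then
          d.insert m1.1 (d.getD m1.1 [] ++ [(m1, m2)])
        else d) d)
      (PySem.Dict.empty : PySem.Dict String (List ((String × Int × Int) × (String × Int × Int))))).keys.length)

-- the inner 'for tmi in range(len(testmatches)) … break' loop of A
def findTmA (gm : List (String × Int × Int)) :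
    List (List (String × Int × Int)) → Option (List (String × Int × Int))
  | [] => none
  | tm :: rest => if identicalMatchesA gm tm then some tm else findTmA gm rest

def evaluateRecall (testmatches : List (List (String × Int × Int))) (goldmatches : List (List (String × Int × Int))) : List (Int × (List (String × Int × Int))) :=
  (PySem.List.enumerate goldmatches 0).foldl (fun foundgms p =>
    match findTmA p.2 testmatches with
    | some tm => foundgms ++ [(p.1, tm)]
    | none => foundgms) []

-- ===== PORT B =====
-- interval-overlap test of one test triple's (s, e) against a gold interval
def ivOverlap (s e : Int) (iv : Int × Int) : Bool :=
  (iv.1 ≤ s && s ≤ iv.2) || (iv.1 ≤ e && e ≤ iv.2) ||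
  (s ≤ iv.1 && iv.1 ≤ e) || (s ≤ iv.2 && iv.2 ≤ e)

-- _overlapsTwoDocs: scan tm once, remembering the first overlapping docid; True on a second one
def twoDocs (groups : PySem.Dict String (List (Int × Int))) :
    List (String × Int × Int) → Option String → Bool
  | [], _ => false
  | m :: rest, first =>
    if (groups.getD m.1 []).any (ivOverlap m.2.1 m.2.2) then
      match first with
      | none => twoDocs groups rest (some m.1)
      | some d => if m.1 == d then twoDocs groups rest first else true
    else twoDocs groups rest first

-- 'groups.setdefault(d, []).append((s, e))' over gm
def groupGm (gm : List (String × Int × Int)) : PySem.Dict String (List (Int × Int)) :=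
  gm.foldl (fun d p => d.modify p.1 [] (· ++ [p.2])) PySem.Dict.empty

def evaluateRecall_alt (testmatches : List (List (String × Int × Int))) (goldmatches : List (List (String × Int × Int))) : List (Int × (List (String × Int × Int))) :=
  (PySem.List.enumerate goldmatches 0).foldl (fun foundgms p =>
    let groups := groupGm p.2
    match testmatches.find? (fun t => twoDocs groups t none) with
    | some tm => foundgms ++ [(p.1, tm)]
    | none => foundgms) []

-- ===== PRECONDITION & SPEC =====
def Spec_evaluateRecall (testmatches : List (List (String × Int × Int))) (goldmatches : List (List (String × Int × Int))) (out : List (Int × (List (String × Int × Int)))) : Prop := out = evaluateRecall_alt testmatches goldmatches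
instance (testmatches : List (List (String × Int × Int))) (goldmatches : List (List (String × Int × Int))) (out : List (Int × (List (String × Int × Int)))) : Decidable (Spec_evaluateRecall testmatches goldmatches out) := by unfold Spec_evaluateRecall; infer_instance

-- ===== CLAIM (what is proved, stated in full; the proofs are below) =====
def Claim_equal_evaluateRecall : Prop := ∀ (testmatches : List (List (String × Int × Int))) (goldmatches : List (List (String × Int × Int))), Dom_evaluateRecall testmatches goldmatches → Spec_evaluateRecall testmatches goldmatches (evaluateRecall testmatches goldmatches)

-- ===== LEMMAS AND PROOFS =====

-- the matched-pair condition, seen from a gold triple m1 and a test triple m2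
def ovP (m1 m2 : String × Int × Int) : Bool :=
  m2.1 == m1.1 && ivOverlap m2.2.1 m2.2.2 m1.2

-- keys accumulated by A's inner loop over match2
theorem mem_keys_innerA (m1 : String × Int × Int) (tm : List (String × Int × Int))
    (d : PySem.Dict String (List ((String × Int × Int) × (String × Int × Int)))) (k : String) :
    k ∈ (tm.foldl (fun d m2 => if ovP m1 m2 then d.insert m1.1 (d.getD m1.1 [] ++ [(m1, m2)]) else d) d).keys
      ↔ k ∈ d.keys ∨ (k = m1.1 ∧ ∃ m2 ∈ tm, ovP m1 m2 = true) := by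
  induction tm generalizing d with
  | nil => simp
  | cons m2 rest ih =>
    simp only [List.foldl_cons]
    by_cases h : ovP m1 m2 = true
    · rw [if_pos h, ih]
      simp [PySem.Dict.mem_keys_insert, h]
      tauto
    · rw [if_neg h, ih]
      simp only [List.mem_cons]
      constructor
      · rintro (hk | ⟨hk, m2', hm, ho⟩)
        · tauto
        · exact Or.inr ⟨hk, m2', Or.inr hm, ho⟩
      · rintro (hk | ⟨hk, m2', (rfl | hm), ho⟩)
        · tauto
        · exact absurd ho h
        · exact Or.inr ⟨hk, m2', hm, ho⟩

theorem nodup_keys_innerA (m1 : String × Int × Int) (tm : List (String × Int × Int))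
    (d : PySem.Dict String (List ((String × Int × Int) × (String × Int × Int))))
    (hd : d.keys.Nodup) :
    (tm.foldl (fun d m2 => if ovP m1 m2 then d.insert m1.1 (d.getD m1.1 [] ++ [(m1, m2)]) else d) d).keys.Nodup := by
  induction tm generalizing d with
  | nil => exact hd
  | cons m2 rest ih =>
    simp only [List.foldl_cons]
    by_cases h : ovP m1 m2 = true
    · rw [if_pos h]; exact ih _ (PySem.Dict.nodup_keys_insert _ _ _ hd)
    · rw [if_neg h]; exact ih _ hd

-- keys accumulated by A's outer loop over match1
theorem mem_keys_outerA (gm tm : List (String × Int × Int))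
    (d : PySem.Dict String (List ((String × Int × Int) × (String × Int × Int)))) (k : String) :
    k ∈ (gm.foldl (fun d m1 =>
          tm.foldl (fun d m2 => if ovP m1 m2 then d.insert m1.1 (d.getD m1.1 [] ++ [(m1, m2)]) else d) d) d).keys
      ↔ k ∈ d.keys ∨ ∃ m1 ∈ gm, m1.1 = k ∧ ∃ m2 ∈ tm, ovP m1 m2 = true := by
  induction gm generalizing d with
  | nil => simp
  | cons m1 rest ih =>
    simp only [List.foldl_cons]
    rw [ih]
    simp only [mem_keys_innerA, List.mem_cons]
    constructor
    · rintro ((hk | ⟨rfl, hex⟩) | ⟨m1', hm, hk, hex⟩)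
      · tauto
      · exact Or.inr ⟨m1, Or.inl rfl, rfl, hex⟩
      · exact Or.inr ⟨m1', Or.inr hm, hk, hex⟩
    · rintro (hk | ⟨m1', (rfl | hm), hk, hex⟩)
      · tauto
      · exact Or.inl (Or.inr ⟨hk.symm, hex⟩)
      · exact Or.inr ⟨m1', hm, hk, hex⟩

theorem nodup_keys_outerA (gm tm : List (String × Int × Int))
    (d : PySem.Dict String (List ((String × Int × Int) × (String × Int × Int))))
    (hd : d.keys.Nodup) :
    (gm.foldl (fun d m1 =>
      tm.foldl (fun d m2 => if ovP m1 m2 then d.insert m1.1 (d.getD m1.1 [] ++ [(m1, m2)]) else d) d) d).keys.Nodup := by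
  induction gm generalizing d with
  | nil => exact hd
  | cons m1 rest ih => exact ih _ (nodup_keys_innerA _ _ _ hd)

-- a Nodup list has length > 1 iff it holds two distinct elements
theorem one_lt_length_iff_two {α : Type} (l : List α) (h : l.Nodup) :
    1 < l.length ↔ ∃ a ∈ l, ∃ b ∈ l, a ≠ b := by
  match l with
  | [] => simp
  | [a] => simp
  | a :: b :: rest =>
    have hab : a ≠ b := by simp [List.nodup_cons] at h; tauto
    constructor
    · intro _; exact ⟨a, by simp, b, by simp, hab⟩
    · intro _; simp only [List.length_cons]; omega

theorem any_filter_map {α β : Type} (l : List α) (p : α → Bool) (f : α → β) (q : β → Bool) :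
    ((l.filter p).map f).any q = l.any (fun a => p a && q (f a)) := by
  induction l with
  | nil => rfl
  | cons a t ih =>
    by_cases h : p a = true <;> simp [h, ih]

-- what the grouped-index lookup holds: the gold intervals filed under this docid
theorem getD_groupGm (gm : List (String × Int × Int)) (k : String) :
    (groupGm gm).getD k [] = (gm.filter (fun p => p.1 == k)).map (·.2) := by
  unfold groupGm
  rw [PySem.Dict.getD_foldl_modify_append]
  simp

theorem hit_eq (gm : List (String × Int × Int)) (m : String × Int × Int) :
    ((groupGm gm).getD m.1 []).any (ivOverlap m.2.1 m.2.2)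
      = gm.any (fun m1 => ovP m1 m) := by
  rw [getD_groupGm, any_filter_map]
  congr 1
  funext m1
  rw [Bool.eq_iff_iff]
  simp only [ovP]
  simp only [Bool.and_eq_true, beq_iff_eq]
  constructor
  · rintro ⟨h1, h2⟩; exact ⟨h1.symm, h2⟩
  · rintro ⟨h1, h2⟩; exact ⟨h1.symm, h2⟩

-- characterization of twoDocs with a remembered first docid
theorem twoDocs_some (groups : PySem.Dict String (List (Int × Int)))
    (tm : List (String × Int × Int)) (d0 : String) :
    twoDocs groups tm (some d0) = true
      ↔ ∃ m ∈ tm, ((groups.getD m.1 []).any (ivOverlap m.2.1 m.2.2)) = true ∧ m.1 ≠ d0 := by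
  induction tm with
  | nil => simp [twoDocs]
  | cons m rest ih =>
    simp only [twoDocs]
    by_cases h : ((groups.getD m.1 []).any (ivOverlap m.2.1 m.2.2)) = true
    · rw [if_pos h]
      by_cases hd : m.1 = d0
      · have hb : (m.1 == d0) = true := beq_iff_eq.mpr hd
        rw [hb, if_pos rfl, ih]
        constructor
        · rintro ⟨m', hm', hh', hne'⟩
          exact ⟨m', List.mem_cons_of_mem _ hm', hh', hne'⟩
        · rintro ⟨m', hm', hh', hne'⟩
          rcases List.mem_cons.mp hm' with heq | hm''
          · subst heq; exact absurd hd hne'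
          · exact ⟨m', hm'', hh', hne'⟩
      · have hb : (m.1 == d0) = false := by simp [hd]
        rw [hb, if_neg (by simp)]
        constructor
        · intro _; exact ⟨m, by simp, h, hd⟩
        · intro _; rfl
    · rw [if_neg h, ih]
      constructor
      · rintro ⟨m', hm', hh', hne'⟩
        exact ⟨m', List.mem_cons_of_mem _ hm', hh', hne'⟩
      · rintro ⟨m', hm', hh', hne'⟩
        rcases List.mem_cons.mp hm' with heq | hm''
        · subst heq; exact absurd hh' h
        · exact ⟨m', hm'', hh', hne'⟩

theorem twoDocs_none (groups : PySem.Dict String (List (Int × Int)))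
    (tm : List (String × Int × Int)) :
    twoDocs groups tm none = true
      ↔ ∃ x ∈ tm, ∃ y ∈ tm,
          ((groups.getD x.1 []).any (ivOverlap x.2.1 x.2.2)) = true ∧
          ((groups.getD y.1 []).any (ivOverlap y.2.1 y.2.2)) = true ∧ x.1 ≠ y.1 := by
  induction tm with
  | nil => simp [twoDocs]
  | cons m rest ih =>
    simp only [twoDocs]
    by_cases h : ((groups.getD m.1 []).any (ivOverlap m.2.1 m.2.2)) = true
    · rw [if_pos h, twoDocs_some]
      constructor
      · rintro ⟨m', hm', hh', hne'⟩
        exact ⟨m', List.mem_cons_of_mem _ hm', m, by simp, hh', h, hne'⟩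
      · rintro ⟨x, hx, y, hy, hhx, hhy, hne⟩
        rcases List.mem_cons.mp hx with heqx | hx' <;> rcases List.mem_cons.mp hy with heqy | hy'
        · subst heqx; subst heqy; exact absurd rfl hne
        · subst heqx; exact ⟨y, hy', hhy, fun e => hne e.symm⟩
        · subst heqy; exact ⟨x, hx', hhx, hne⟩
        · by_cases hxm : x.1 = m.1
          · refine ⟨y, hy', hhy, fun e => hne ?_⟩
            rw [hxm, e]
          · exact ⟨x, hx', hhx, hxm⟩
    · rw [if_neg h, ih]
      constructor
      · rintro ⟨x, hx, y, hy, hhx, hhy, hne⟩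
        exact ⟨x, List.mem_cons_of_mem _ hx, y, List.mem_cons_of_mem _ hy, hhx, hhy, hne⟩
      · rintro ⟨x, hx, y, hy, hhx, hhy, hne⟩
        rcases List.mem_cons.mp hx with heqx | hx'
        · subst heqx; exact absurd hhx h
        rcases List.mem_cons.mp hy with heqy | hy'
        · subst heqy; exact absurd hhy h
        exact ⟨x, hx', y, hy', hhx, hhy, hne⟩

-- the central equivalence: A's pair-dict cardinality test equals B's indexed two-docid scan
theorem identical_eq (gm tm : List (String × Int × Int)) :
    identicalMatchesA gm tm = twoDocs (groupGm gm) tm none := by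
  have hA : identicalMatchesA gm tm = true ↔
      ∃ d d' : String, d ≠ d' ∧
        (∃ m1 ∈ gm, m1.1 = d ∧ ∃ m2 ∈ tm, ovP m1 m2 = true) ∧
        (∃ m1 ∈ gm, m1.1 = d' ∧ ∃ m2 ∈ tm, ovP m1 m2 = true) := by
    have hn := nodup_keys_outerA gm tm
      (PySem.Dict.empty : PySem.Dict String (List ((String × Int × Int) × (String × Int × Int))))
      PySem.Dict.nodup_keys_empty
    have h0 : identicalMatchesA gm tm = true ↔
        1 < ((gm.foldl (fun d m1 =>
            tm.foldl (fun d m2 => if ovP m1 m2 then d.insert m1.1 (d.getD m1.1 [] ++ [(m1, m2)]) else d) d)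
          (PySem.Dict.empty : PySem.Dict String (List ((String × Int × Int) × (String × Int × Int)))))).keys.length := by
      unfold identicalMatchesA; exact decide_eq_true_iff
    rw [h0, one_lt_length_iff_two _ hn]
    constructor
    · rintro ⟨a, ha, b, hb, hab⟩
      rw [mem_keys_outerA] at ha hb
      simp only [PySem.Dict.keys_empty, List.not_mem_nil, false_or] at ha hb
      exact ⟨a, b, hab, ha, hb⟩
    · rintro ⟨a, b, hab, ha, hb⟩
      refine ⟨a, ?_, b, ?_, hab⟩ <;> rw [mem_keys_outerA] <;>
        simp only [PySem.Dict.keys_empty, List.not_mem_nil, false_or]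
      · exact ha
      · exact hb
  have hB : twoDocs (groupGm gm) tm none = true ↔
      ∃ d d' : String, d ≠ d' ∧
        (∃ m1 ∈ gm, m1.1 = d ∧ ∃ m2 ∈ tm, ovP m1 m2 = true) ∧
        (∃ m1 ∈ gm, m1.1 = d' ∧ ∃ m2 ∈ tm, ovP m1 m2 = true) := by
    rw [twoDocs_none]
    constructor
    · rintro ⟨x, hx, y, hy, hhx, hhy, hne⟩
      rw [hit_eq] at hhx hhy
      rw [List.any_eq_true] at hhx hhy
      obtain ⟨m1, hm1, ho1⟩ := hhx
      obtain ⟨m1p, hm1p, ho1p⟩ := hhy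
      have e1 : m1.1 = x.1 := by
        have h2 := ho1; simp only [ovP, Bool.and_eq_true, beq_iff_eq] at h2; exact h2.1.symm
      have e1p : m1p.1 = y.1 := by
        have h2 := ho1p; simp only [ovP, Bool.and_eq_true, beq_iff_eq] at h2; exact h2.1.symm
      exact ⟨x.1, y.1, hne, ⟨m1, hm1, e1, x, hx, ho1⟩, ⟨m1p, hm1p, e1p, y, hy, ho1p⟩⟩
    · rintro ⟨a, b, hab, ⟨m1, hm1, ha1, m2, hm2, ho⟩, ⟨m1p, hm1p, hb1, m2p, hm2p, hop⟩⟩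
      have e2 : m2.1 = m1.1 := by
        have h2 := ho; simp only [ovP, Bool.and_eq_true, beq_iff_eq] at h2; exact h2.1
      have e2p : m2p.1 = m1p.1 := by
        have h2 := hop; simp only [ovP, Bool.and_eq_true, beq_iff_eq] at h2; exact h2.1
      refine ⟨m2, hm2, m2p, hm2p, ?_, ?_, ?_⟩
      · rw [hit_eq, List.any_eq_true]; exact ⟨m1, hm1, ho⟩
      · rw [hit_eq, List.any_eq_true]; exact ⟨m1p, hm1p, hop⟩
      · rw [e2, e2p, ha1, hb1]; exact hab
  have hiff := hA.trans hB.symm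
  cases h1 : identicalMatchesA gm tm <;> cases h2 : twoDocs (groupGm gm) tm none <;>
    simp_all

theorem findTmA_eq_find? (gm : List (String × Int × Int))
    (tms : List (List (String × Int × Int))) :
    findTmA gm tms = tms.find? (fun t => twoDocs (groupGm gm) t none) := by
  induction tms with
  | nil => rfl
  | cons tm rest ih =>
    simp only [findTmA, List.find?_cons, identical_eq]
    cases h : twoDocs (groupGm gm) tm none <;> simp [ih]

-- ===== VERDICT (by name: the statement is the Claim_ definition above) =====
theorem evaluateRecall_spec : Claim_equal_evaluateRecall := by
  intro testmatches goldmatches _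
  unfold Spec_evaluateRecall evaluateRecall evaluateRecall_alt
  have hf : (fun (foundgms : List (Int × List (String × Int × Int))) (p : Int × List (String × Int × Int)) =>
      match findTmA p.2 testmatches with
      | some tm => foundgms ++ [(p.1, tm)]
      | none => foundgms) =
      (fun (foundgms : List (Int × List (String × Int × Int))) (p : Int × List (String × Int × Int)) =>
      let groups := groupGm p.2
      match testmatches.find? (fun t => twoDocs groups t none) with
      | some tm => foundgms ++ [(p.1, tm)]
      | none => foundgms) := by
    funext acc p
    rw [findTmA_eq_find?]
  rw [hf]
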